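-- pv_equiv track=rewrite | github.com/dhh1128/const_fix | const_fix.py | _classify_func
-- ===== SOURCE A (Python) =====
-- CONST_IRRELEVANT = 0
--
-- CONST_MATTERS = 1
--
-- OBNOXIOUS_CONST = 2
--
-- def _classify_func(params):
--     cls = CONST_IRRELEVANT
--     if params:
--         for p in params:
--             if ('*' in p or '&' in p) and ('const' not in p):
--                 return CONST_MATTERS
--             elif 'const' in p:
--                 cls = OBNOXIOUS_CONST
--     return cls
-- ===== SOURCE B (Python) =====
-- CONST_IRRELEVANT = 0
--
-- CONST_MATTERS = 1
--
-- OBNOXIOUS_CONST = 2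
--
-- def _classify_func(params):
--     if not params:
--         return CONST_IRRELEVANT
--     if any(('*' in p or '&' in p) and 'const' not in p for p in params):
--         return CONST_MATTERS
--     if any('const' in p for p in params):
--         return OBNOXIOUS_CONST
--     return CONST_IRRELEVANT
-- ===== Notes on version B (the rewrite author's own statement) =====
-- stated objective: simpler
-- what changed: Replaces the single fused early-return loop with a running cls accumulator by two ordered any() predicate scans: first check for a pointer/reference param without const (CONST_MATTERS), then for any const param (OBNOXIOUS_CONST).
import Mathlib
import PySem

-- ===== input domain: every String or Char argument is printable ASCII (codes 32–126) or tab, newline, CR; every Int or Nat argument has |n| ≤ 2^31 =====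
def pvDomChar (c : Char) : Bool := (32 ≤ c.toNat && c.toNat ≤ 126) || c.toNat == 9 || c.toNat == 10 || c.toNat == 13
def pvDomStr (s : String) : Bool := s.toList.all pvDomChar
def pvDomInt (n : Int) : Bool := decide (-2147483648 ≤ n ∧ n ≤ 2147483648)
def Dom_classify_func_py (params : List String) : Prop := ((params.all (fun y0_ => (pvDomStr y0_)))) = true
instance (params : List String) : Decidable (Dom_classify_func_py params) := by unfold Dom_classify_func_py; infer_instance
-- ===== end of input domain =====

-- B replaces A's fused early-return loop (with a running cls accumulator) by two ordered any-scans; same cost, plainer control flow.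
-- ===== PORT A =====
-- the for-loop of _classify_func: early return 1, cls may be promoted to 2
def classifyLoopA : List String → Int → Int
  | [], cls => cls
  | p :: rest, cls =>
    if (PySem.Str.isIn "*" p || PySem.Str.isIn "&" p) && !(PySem.Str.isIn "const" p) then 1
    else if PySem.Str.isIn "const" p then classifyLoopA rest 2
    else classifyLoopA rest cls

def classify_func_py (params : List String) : Int :=
  if params = [] then 0 else classifyLoopA params 0

-- ===== PORT B =====
def classify_func_py_alt (params : List String) : Int :=
  if params = [] then 0
  else if params.any (fun p => (PySem.Str.isIn "*" p || PySem.Str.isIn "&" p) && !(PySem.Str.isIn "const" p)) then 1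
  else if params.any (fun p => PySem.Str.isIn "const" p) then 2
  else 0

-- ===== PRECONDITION & SPEC =====
def Spec_classify_func_py (params : List String) (out : Int) : Prop := out = classify_func_py_alt params
instance (params : List String) (out : Int) : Decidable (Spec_classify_func_py params out) := by unfold Spec_classify_func_py; infer_instance

-- ===== CLAIM (what is proved, stated in full; the proofs are below) =====
def Claim_equal_classify_func_py : Prop := ∀ (params : List String), Dom_classify_func_py params → Spec_classify_func_py params (classify_func_py params)

-- ===== LEMMAS AND PROOFS =====

theorem classifyLoopA_eq (l : List String) (cls : Int) :
    classifyLoopA l cls =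
      if l.any (fun p => (PySem.Str.isIn "*" p || PySem.Str.isIn "&" p) && !(PySem.Str.isIn "const" p)) then 1
      else if l.any (fun p => PySem.Str.isIn "const" p) then 2
      else cls := by
  induction l generalizing cls with
  | nil => simp [classifyLoopA]
  | cons p rest ih =>
    cases hs : (PySem.Str.isIn "*" p || PySem.Str.isIn "&" p) <;>
      cases hc : PySem.Str.isIn "const" p <;>
        (simp only [classifyLoopA, List.any_cons, hs, hc, Bool.not_true, Bool.not_false,
          Bool.and_false, Bool.and_true, Bool.false_or, Bool.true_or, ite_self, ih]
         simp)

-- ===== VERDICT (by name: the statement is the Claim_ definition above) =====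
theorem classify_func_py_spec : Claim_equal_classify_func_py := by
  intro params _
  unfold Spec_classify_func_py classify_func_py classify_func_py_alt
  by_cases h : params = []
  · simp [h]
  · simp [h, classifyLoopA_eq]
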